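-- pv_equiv track=rewrite | github.com/camzgray/matching | matching2.py | make_decisions_1
-- ===== SOURCE A (Python) =====
-- import copy
--
-- def make_decisions_1(pMatrix,pairings):
--     """
--     From a preference matrix and a list of pairings, takes any card with only one acceptable person and pairs
--     them with that card. Returns a new preference matrix (not including the paired person) and list of pairings in a tuple.
--     """
--     newPairings = copy.deepcopy(pairings)
--     pMatrixNew = copy.deepcopy(pMatrix)
--     for i in range(len(pMatrixNew)):
--         if len(pMatrixNew[i]) == 1:
--             match = pMatrixNew[i][0]
--             newPairings.append((i,match))
--             for j in range(len(pMatrixNew)):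
--                 tempList = pMatrixNew[j]
--                 if match in tempList:
--                     tempList.remove(match)
--                     pMatrixNew[j] = tempList
--     return (pMatrixNew,newPairings)
-- ===== SOURCE B (Python) =====
-- def make_decisions_1(pMatrix, pairings):
--     """Same result as A, but keeps an index occ: value -> set of row indices
--     currently containing it, so a match prunes only the affected rows instead
--     of scanning the whole matrix."""
--     rows = [list(r) for r in pMatrix]
--     pairs = list(pairings)
--     occ = {}
--     for j, r in enumerate(rows):
--         for v in r:
--             s = occ.get(v, set())
--             s.add(j)
--             occ[v] = s
--     for i in range(len(rows)):
--         if len(rows[i]) == 1: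
--             m = rows[i][0]
--             pairs.append((i, m))
--             for j in sorted(occ.get(m, set())):
--                 row = rows[j]
--                 row.remove(m)
--                 rows[j] = row
--                 if m not in row:
--                     occ[m] = occ[m] - {j}
--     return (rows, pairs)
-- ===== Notes on version B (the rewrite author's own statement) =====
-- stated objective: faster
-- what changed: B builds a value-to-row-indices index once and, when a singleton row is matched, removes the value only from the rows its index lists (updating the index), instead of A's rescan of every row on every match.
import Mathlib
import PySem

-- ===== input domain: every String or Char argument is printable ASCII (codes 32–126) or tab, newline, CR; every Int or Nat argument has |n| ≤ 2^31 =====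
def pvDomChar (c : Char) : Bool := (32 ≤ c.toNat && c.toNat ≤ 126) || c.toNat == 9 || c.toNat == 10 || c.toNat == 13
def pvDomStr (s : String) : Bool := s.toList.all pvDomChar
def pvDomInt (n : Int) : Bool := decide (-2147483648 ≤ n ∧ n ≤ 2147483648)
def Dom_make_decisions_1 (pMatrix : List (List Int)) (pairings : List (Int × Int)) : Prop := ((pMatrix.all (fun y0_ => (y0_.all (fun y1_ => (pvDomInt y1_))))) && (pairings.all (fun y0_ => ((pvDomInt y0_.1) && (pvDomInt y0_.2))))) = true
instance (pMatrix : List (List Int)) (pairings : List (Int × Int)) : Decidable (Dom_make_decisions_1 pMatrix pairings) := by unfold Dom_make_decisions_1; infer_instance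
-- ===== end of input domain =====

-- B replaces A's rescan of every row after each match by a value→row-indices index (faster); equivalence of return values is proved below.

-- ===== PORT A =====
-- inner loop body: 'tempList = pMatrixNew[j]; if match in tempList: tempList.remove(match); pMatrixNew[j] = tempList'
-- ('list.remove' cannot raise here: it runs only under the membership test, so '.getD' is exact)
def aInner (m : Int) (mm : List (List Int)) (j : Int) : List (List Int) :=
  if m ∈ PySem.List.pyGetD mm j [] then
    PySem.List.pySetD mm j ((PySem.List.remove? (PySem.List.pyGetD mm j []) m).getD (PySem.List.pyGetD mm j []))
  else mm

-- body of 'for i in range(len(pMatrixNew)): if len(pMatrixNew[i]) == 1: …' ; 'pMatrixNew[i]' / '[0]' indices are in range: pyGetD is exact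
def aOuter (st : List (List Int) × List (Int × Int)) (i : Int) : List (List Int) × List (Int × Int) :=
  if (PySem.List.pyGetD st.1 i []).length = 1 then
    ((PySem.List.pyRange 0 st.1.length 1).foldl (aInner (PySem.List.pyGetD (PySem.List.pyGetD st.1 i []) 0 0)) st.1,
     st.2 ++ [(i, PySem.List.pyGetD (PySem.List.pyGetD st.1 i []) 0 0)])
  else st

-- deepcopy of pure data is the identity on values
def make_decisions_1 (pMatrix : List (List Int)) (pairings : List (Int × Int)) : List (List Int) × (List (Int × Int)) :=
  (PySem.List.pyRange 0 pMatrix.length 1).foldl aOuter (pMatrix, pairings)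

-- ===== PORT B =====
-- 'occ = {}; for j, r in enumerate(rows): for v in r: s = occ.get(v, set()); s.add(j); occ[v] = s'
def buildOcc (rows : List (List Int)) : PySem.Dict Int (PySem.Set Int) :=
  (PySem.List.enumerate rows 0).foldl
    (fun occ jr =>
      jr.2.foldl (fun occ v => occ.insert v (PySem.Set.add (occ.getD v PySem.Set.empty) jr.1)) occ)
    PySem.Dict.empty

-- body of 'for j in sorted(occ.get(m, set())): row = rows[j]; row.remove(m); rows[j] = row; if m not in row: occ[m] = occ[m] - {j}'
-- ('row.remove(m)' cannot raise: occ lists exactly the rows containing m (proved below), so '.getD' is exact; 'occ[m]' key exists then too)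
def altStep (m : Int) (ro : List (List Int) × PySem.Dict Int (PySem.Set Int)) (j : Int) :
    List (List Int) × PySem.Dict Int (PySem.Set Int) :=
  (PySem.List.pySetD ro.1 j ((PySem.List.remove? (PySem.List.pyGetD ro.1 j []) m).getD (PySem.List.pyGetD ro.1 j [])),
   if m ∈ (PySem.List.remove? (PySem.List.pyGetD ro.1 j []) m).getD (PySem.List.pyGetD ro.1 j []) then ro.2
   else ro.2.insert m (PySem.Set.diff (ro.2.getD m PySem.Set.empty) [j]))

-- body of B's main loop: on a singleton row, pair it and prune only the rows listed in occ (in sorted order), updating occ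
def bOuter (st : List (List Int) × List (Int × Int) × PySem.Dict Int (PySem.Set Int)) (i : Int) :
    List (List Int) × List (Int × Int) × PySem.Dict Int (PySem.Set Int) :=
  if (PySem.List.pyGetD st.1 i []).length = 1 then
    (((PySem.List.sorted (st.2.2.getD (PySem.List.pyGetD (PySem.List.pyGetD st.1 i []) 0 0) PySem.Set.empty) (fun x => x) false).foldl
        (altStep (PySem.List.pyGetD (PySem.List.pyGetD st.1 i []) 0 0)) (st.1, st.2.2)).1,
     st.2.1 ++ [(i, PySem.List.pyGetD (PySem.List.pyGetD st.1 i []) 0 0)],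
     ((PySem.List.sorted (st.2.2.getD (PySem.List.pyGetD (PySem.List.pyGetD st.1 i []) 0 0) PySem.Set.empty) (fun x => x) false).foldl
        (altStep (PySem.List.pyGetD (PySem.List.pyGetD st.1 i []) 0 0)) (st.1, st.2.2)).2)
  else st

-- 'rows = [list(r) for r in pMatrix]' and 'pairs = list(pairings)' copy values: identity here
def make_decisions_1_alt (pMatrix : List (List Int)) (pairings : List (Int × Int)) : List (List Int) × (List (Int × Int)) :=
  ((((PySem.List.pyRange 0 pMatrix.length 1).foldl bOuter (pMatrix, pairings, buildOcc pMatrix))).1,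
   (((PySem.List.pyRange 0 pMatrix.length 1).foldl bOuter (pMatrix, pairings, buildOcc pMatrix))).2.1)

-- ===== PRECONDITION & SPEC =====
def Spec_make_decisions_1 (pMatrix : List (List Int)) (pairings : List (Int × Int)) (out : List (List Int) × (List (Int × Int))) : Prop := out = make_decisions_1_alt pMatrix pairings
instance (pMatrix : List (List Int)) (pairings : List (Int × Int)) (out : List (List Int) × (List (Int × Int))) : Decidable (Spec_make_decisions_1 pMatrix pairings out) := by unfold Spec_make_decisions_1; infer_instance

-- ===== CLAIM (what is proved, stated in full; the proofs are below) =====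
def Claim_equal_make_decisions_1 : Prop := ∀ (pMatrix : List (List Int)) (pairings : List (Int × Int)), Dom_make_decisions_1 pMatrix pairings → Spec_make_decisions_1 pMatrix pairings (make_decisions_1 pMatrix pairings)

-- ===== LEMMAS AND PROOFS =====

-- row j of a matrix, and the effect of one Python 'remove' (identity when m is absent)
def rowAt (mat : List (List Int)) (j : Int) : List Int := PySem.List.pyGetD mat j []
def pruneRow (m : Int) (r : List Int) : List Int := (PySem.List.remove? r m).getD r

-- occ is exact: j is listed under v iff row j currently contains v
def OccInv (occ : PySem.Dict Int (PySem.Set Int)) (mat : List (List Int)) : Prop :=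
  ∀ v j : Int, j ∈ occ.getD v PySem.Set.empty ↔ (0 ≤ j ∧ j < (mat.length : Int) ∧ v ∈ rowAt mat j)
def OccNodup (occ : PySem.Dict Int (PySem.Set Int)) : Prop :=
  ∀ v : Int, (occ.getD v PySem.Set.empty).Nodup

theorem pruneRow_of_not_mem (m : Int) (r : List Int) (h : m ∉ r) : pruneRow m r = r := by
  unfold pruneRow
  rw [(PySem.List.remove?_eq_none_iff r m).2 h]
  rfl

theorem pruneRow_of_mem (m : Int) (r : List Int) (h : m ∈ r) : pruneRow m r = r.erase m := by
  unfold pruneRow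
  rw [PySem.List.remove?_eq_some_erase r m h]
  rfl

theorem mem_pruneRow_of_ne (m v : Int) (r : List Int) (h : v ≠ m) : v ∈ pruneRow m r ↔ v ∈ r := by
  by_cases hm : m ∈ r
  · rw [pruneRow_of_mem m r hm]
    exact List.mem_erase_of_ne h
  · rw [pruneRow_of_not_mem m r hm]

theorem mem_pruneRow_self (m : Int) (r : List Int) : m ∈ pruneRow m r → m ∈ r := by
  intro hmem
  by_cases hm : m ∈ r
  · exact hm
  · rw [pruneRow_of_not_mem m r hm] at hmem
    exact hmem

theorem rowAt_oob (mat : List (List Int)) (i : Int) (h0 : 0 ≤ i) (h : (mat.length : Int) ≤ i) : rowAt mat i = [] := by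
  apply PySem.List.pyGetD_of_none
  simp only [PySem.List.pyGet?, PySem.List.pyIdx?]
  rw [if_pos h0, if_neg (by omega)]
  rfl

theorem rowAt_nonempty_lt (mat : List (List Int)) (i : Int) (h0 : 0 ≤ i) (h : rowAt mat i ≠ []) : i < (mat.length : Int) := by
  by_contra hc
  exact h (rowAt_oob mat i h0 (by omega))

theorem rowAt_set (mat : List (List Int)) (j : Int) (r : List Int) (j' : Int)
    (h0 : 0 ≤ j) (h0' : 0 ≤ j') (hj : j < (mat.length : Int)) :
    rowAt (PySem.List.pySetD mat j r) j' = if j' = j then r else rowAt mat j' := by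
  rw [show PySem.List.pySetD mat j r = mat.set j.toNat r from PySem.List.pySetD_of_nonneg mat r h0]
  by_cases hlt : j' < (mat.length : Int)
  · unfold rowAt
    rw [PySem.List.pyGetD_eq_getElem _ _ h0' (by simpa using hlt),
        PySem.List.pyGetD_eq_getElem _ _ h0' hlt]
    rw [List.getElem_set]
    by_cases he : j' = j
    · rw [if_pos he, if_pos (by omega)]
    · rw [if_neg he, if_neg (by omega)]
  · rw [if_neg (by omega)]
    rw [show (mat.set j.toNat r) = mat.set j.toNat r from rfl]
    rw [rowAt_oob _ _ h0' (by simpa using (by omega : (mat.length : Int) ≤ j')),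
        rowAt_oob _ _ h0' (by omega)]

theorem aInner_length (m : Int) (mat : List (List Int)) (j : Int) : (aInner m mat j).length = mat.length := by
  unfold aInner
  split
  · exact PySem.List.length_pySetD ..
  · rfl

theorem aInner_rowAt (m : Int) (mat : List (List Int)) (j j' : Int) (h0 : 0 ≤ j) (h0' : 0 ≤ j') :
    rowAt (aInner m mat j) j' = if j' = j then pruneRow m (rowAt mat j) else rowAt mat j' := by
  unfold aInner
  by_cases hm : m ∈ PySem.List.pyGetD mat j []
  · have hne : rowAt mat j ≠ [] := by
      intro h
      rw [show rowAt mat j = PySem.List.pyGetD mat j [] from rfl] at h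
      rw [h] at hm
      exact absurd hm (List.not_mem_nil)
    have hj : j < (mat.length : Int) := rowAt_nonempty_lt mat j h0 hne
    rw [if_pos hm, rowAt_set mat j _ j' h0 h0' hj]
    rfl
  · rw [if_neg hm]
    by_cases he : j' = j
    · subst he
      rw [if_pos rfl]
      exact (pruneRow_of_not_mem m _ hm).symm
    · rw [if_neg he]

theorem foldA_gen (m : Int) : ∀ (js : List Int) (mat : List (List Int)), js.Nodup → (∀ j ∈ js, 0 ≤ j) →
    (js.foldl (aInner m) mat).length = mat.length ∧
    ∀ j : Int, 0 ≤ j → rowAt (js.foldl (aInner m) mat) j = if j ∈ js then pruneRow m (rowAt mat j) else rowAt mat j := by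
  intro js
  induction js with
  | nil => exact fun mat _ _ => ⟨rfl, fun j _ => by simp⟩
  | cons j t ih =>
    intro mat hnd hpos
    have hj0 : 0 ≤ j := hpos j (by simp)
    have hnd' := List.nodup_cons.1 hnd
    obtain ⟨hlen, hrow⟩ := ih (aInner m mat j) hnd'.2 (fun x hx => hpos x (by simp [hx]))
    rw [List.foldl_cons]
    refine ⟨by rw [hlen, aInner_length], ?_⟩
    intro j' h0'
    rw [hrow j' h0', aInner_rowAt m mat j j' hj0 h0']
    by_cases he : j' = j
    · subst he
      simp [hnd'.1]
    · by_cases ht : j' ∈ t <;> simp [he, ht]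

theorem altStep_inv (m : Int) (mat : List (List Int)) (occ : PySem.Dict Int (PySem.Set Int)) (j : Int)
    (h0 : 0 ≤ j) (hj : j < (mat.length : Int)) (hnd : OccNodup occ) (hinv : OccInv occ mat) :
    OccNodup (altStep m (mat, occ) j).2 ∧ OccInv (altStep m (mat, occ) j).2 (altStep m (mat, occ) j).1 := by
  have hfst : (altStep m (mat, occ) j).1 = PySem.List.pySetD mat j (pruneRow m (rowAt mat j)) := rfl
  have hrow1 : ∀ x : Int, 0 ≤ x →
      rowAt (altStep m (mat, occ) j).1 x = if x = j then pruneRow m (rowAt mat j) else rowAt mat x := by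
    intro x hx
    rw [hfst, rowAt_set mat j _ x h0 hx hj]
  have hlen1 : ((altStep m (mat, occ) j).1.length : Int) = (mat.length : Int) := by
    rw [hfst, PySem.List.length_pySetD]
  by_cases hm : m ∈ pruneRow m (rowAt mat j)
  · have hsnd : (altStep m (mat, occ) j).2 = occ := by
      show (if m ∈ (PySem.List.remove? (PySem.List.pyGetD mat j []) m).getD (PySem.List.pyGetD mat j []) then occ
            else occ.insert m (PySem.Set.diff (occ.getD m PySem.Set.empty) [j])) = occ
      exact if_pos hm
    rw [hsnd]
    refine ⟨hnd, ?_⟩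
    intro v x
    rw [hinv v x, hlen1]
    by_cases hxr : 0 ≤ x ∧ x < (mat.length : Int)
    · rw [hrow1 x hxr.1]
      by_cases he : x = j
      · subst he
        rw [if_pos rfl]
        constructor
        · rintro ⟨a, b, hv⟩
          refine ⟨a, b, ?_⟩
          by_cases hvm : v = m
          · subst hvm; exact hm
          · exact (mem_pruneRow_of_ne m v _ hvm).2 hv
        · rintro ⟨a, b, hv⟩
          refine ⟨a, b, ?_⟩
          by_cases hvm : v = m
          · subst hvm; exact mem_pruneRow_self _ _ hm
          · exact (mem_pruneRow_of_ne m v _ hvm).1 hv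
      · rw [if_neg he]
    · constructor
      · rintro ⟨a, b, _⟩; exact absurd ⟨a, b⟩ hxr
      · rintro ⟨a, b, _⟩; exact absurd ⟨a, b⟩ hxr
  · have hsnd : (altStep m (mat, occ) j).2 = occ.insert m (PySem.Set.diff (occ.getD m PySem.Set.empty) [j]) := by
      show (if m ∈ (PySem.List.remove? (PySem.List.pyGetD mat j []) m).getD (PySem.List.pyGetD mat j []) then occ
            else occ.insert m (PySem.Set.diff (occ.getD m PySem.Set.empty) [j])) = _
      exact if_neg hm
    rw [hsnd]
    constructor
    · intro v
      rw [PySem.Dict.getD_insert]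
      by_cases hvm : v = m
      · rw [if_pos hvm]
        exact PySem.Set.nodup_diff _ _ (hnd m)
      · rw [if_neg hvm]
        exact hnd v
    · intro v x
      rw [PySem.Dict.getD_insert, hlen1]
      by_cases hvm : v = m
      · subst hvm
        rw [if_pos rfl, PySem.Set.mem_diff, hinv _ x]
        by_cases hxr : 0 ≤ x ∧ x < (mat.length : Int)
        · rw [hrow1 x hxr.1]
          by_cases he : x = j
          · subst he
            simp [hm]
          · simp [he]
        · constructor
          · rintro ⟨⟨a, b, _⟩, _⟩; exact absurd ⟨a, b⟩ hxr
          · rintro ⟨a, b, _⟩; exact absurd ⟨a, b⟩ hxr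
      · rw [if_neg hvm, hinv v x]
        by_cases hxr : 0 ≤ x ∧ x < (mat.length : Int)
        · rw [hrow1 x hxr.1]
          by_cases he : x = j
          · subst he
            rw [if_pos rfl, mem_pruneRow_of_ne m v _ hvm]
          · rw [if_neg he]
        · constructor
          · rintro ⟨a, b, _⟩; exact absurd ⟨a, b⟩ hxr
          · rintro ⟨a, b, _⟩; exact absurd ⟨a, b⟩ hxr

theorem foldB_gen (m : Int) : ∀ (js : List Int) (mat : List (List Int)) (occ : PySem.Dict Int (PySem.Set Int)),
    js.Nodup → (∀ j ∈ js, 0 ≤ j ∧ j < (mat.length : Int)) → OccNodup occ → OccInv occ mat →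
    (js.foldl (altStep m) (mat, occ)).1.length = mat.length ∧
    (∀ j : Int, 0 ≤ j → rowAt (js.foldl (altStep m) (mat, occ)).1 j = if j ∈ js then pruneRow m (rowAt mat j) else rowAt mat j) ∧
    OccNodup (js.foldl (altStep m) (mat, occ)).2 ∧ OccInv (js.foldl (altStep m) (mat, occ)).2 (js.foldl (altStep m) (mat, occ)).1 := by
  intro js
  induction js with
  | nil => exact fun mat occ _ _ hnd hinv => ⟨rfl, fun j _ => by simp, hnd, hinv⟩
  | cons j t ih =>
    intro mat occ hnd hrange hocnd hinv
    have hj0 : 0 ≤ j := (hrange j (by simp)).1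
    have hjl : j < (mat.length : Int) := (hrange j (by simp)).2
    have hnd' := List.nodup_cons.1 hnd
    have hfst : (altStep m (mat, occ) j).1 = PySem.List.pySetD mat j (pruneRow m (rowAt mat j)) := rfl
    have hlen1 : (altStep m (mat, occ) j).1.length = mat.length := by
      rw [hfst, PySem.List.length_pySetD]
    obtain ⟨hoc1, hinv1⟩ := altStep_inv m mat occ j hj0 hjl hocnd hinv
    obtain ⟨ihlen, ihrow, ihnd, ihinv⟩ :=
      ih (altStep m (mat, occ) j).1 (altStep m (mat, occ) j).2 hnd'.2
        (fun x hx => ⟨(hrange x (by simp [hx])).1, by rw [hlen1]; exact (hrange x (by simp [hx])).2⟩)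
        hoc1 hinv1
    rw [List.foldl_cons]
    have hpair : altStep m (mat, occ) j = ((altStep m (mat, occ) j).1, (altStep m (mat, occ) j).2) := rfl
    rw [hpair] at *
    refine ⟨by rw [ihlen, hlen1], ?_, ihnd, ihinv⟩
    intro j' h0'
    rw [ihrow j' h0']
    have hrw : rowAt (altStep m (mat, occ) j).1 j' = if j' = j then pruneRow m (rowAt mat j) else rowAt mat j' := by
      rw [hfst, rowAt_set mat j _ j' hj0 h0' hjl]
    by_cases he : j' = j
    · subst he
      rw [hrw]
      simp [hnd'.1]
    · by_cases ht : j' ∈ t <;> simp [he, ht, hrw]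

theorem buildRow_mem : ∀ (r : List Int) (occ : PySem.Dict Int (PySem.Set Int)) (j v x : Int),
    (x ∈ (r.foldl (fun occ v => occ.insert v (PySem.Set.add (occ.getD v PySem.Set.empty) j)) occ).getD v PySem.Set.empty) ↔
    (x ∈ occ.getD v PySem.Set.empty ∨ (v ∈ r ∧ x = j)) := by
  intro r
  induction r with
  | nil => intro occ j v x; simp
  | cons v0 t ih =>
    intro occ j v x
    rw [List.foldl_cons, ih]
    rw [PySem.Dict.getD_insert]
    by_cases hv : v = v0
    · subst hv
      rw [if_pos rfl, PySem.Set.mem_add]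
      constructor
      · rintro (⟨h | h⟩ | h)
        · exact Or.inl h
        · exact Or.inr ⟨by simp, h⟩
        · exact Or.inr ⟨by simp [h.1], h.2⟩
      · rintro (h | ⟨_, h⟩)
        · exact Or.inl (Or.inl h)
        · exact Or.inl (Or.inr h)
    · rw [if_neg hv]
      constructor
      · rintro (h | h)
        · exact Or.inl h
        · exact Or.inr ⟨by simp [h.1], h.2⟩
      · rintro (h | ⟨hm, h⟩)
        · exact Or.inl h
        · rcases List.mem_cons.1 hm with h' | h'
          · exact absurd h' hv
          · exact Or.inr ⟨h', h⟩

theorem buildRow_nodup : ∀ (r : List Int) (occ : PySem.Dict Int (PySem.Set Int)) (j : Int),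
    OccNodup occ → OccNodup (r.foldl (fun occ v => occ.insert v (PySem.Set.add (occ.getD v PySem.Set.empty) j)) occ) := by
  intro r
  induction r with
  | nil => exact fun occ j h => h
  | cons v0 t ih =>
    intro occ j h
    rw [List.foldl_cons]
    apply ih
    intro v
    rw [PySem.Dict.getD_insert]
    by_cases hv : v = v0
    · rw [if_pos hv]
      exact PySem.Set.nodup_add _ _ (h v0)
    · rw [if_neg hv]
      exact h v

theorem buildAll_mem : ∀ (rows : List (List Int)) (s : Int) (occ : PySem.Dict Int (PySem.Set Int)) (v x : Int),
    (x ∈ ((PySem.List.enumerate rows s).foldl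
        (fun occ jr => jr.2.foldl (fun occ v => occ.insert v (PySem.Set.add (occ.getD v PySem.Set.empty) jr.1)) occ)
        occ).getD v PySem.Set.empty) ↔
    (x ∈ occ.getD v PySem.Set.empty ∨ ∃ k : Nat, ∃ hk : k < rows.length, v ∈ rows[k] ∧ x = s + k) := by
  intro rows
  induction rows with
  | nil =>
    intro s occ v x
    rw [PySem.List.enumerate_nil]
    simp
  | cons r t ih =>
    intro s occ v x
    rw [PySem.List.enumerate_cons, List.foldl_cons, ih]
    have hb := buildRow_mem r occ s v x
    constructor
    · rintro (h | ⟨k, hk, hv, hx⟩)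
      · rcases hb.1 h with h' | ⟨hm, hx⟩
        · exact Or.inl h'
        · exact Or.inr ⟨0, by simp, by simpa using hm, by simpa using hx⟩
      · refine Or.inr ⟨k + 1, by simpa using hk, by simpa using hv, by push_cast; omega⟩
    · rintro (h | ⟨k, hk, hv, hx⟩)
      · exact Or.inl (hb.2 (Or.inl h))
      · cases k with
        | zero => exact Or.inl (hb.2 (Or.inr ⟨by simpa using hv, by simpa using hx⟩))
        | succ k' =>
          refine Or.inr ⟨k', by simpa using hk, by simpa using hv, by push_cast at hx ⊢; omega⟩

theorem buildOcc_nodup (rows : List (List Int)) : OccNodup (buildOcc rows) := by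
  unfold buildOcc
  have : ∀ (rs : List (List Int)) (s : Int) (occ : PySem.Dict Int (PySem.Set Int)), OccNodup occ →
      OccNodup ((PySem.List.enumerate rs s).foldl
        (fun occ jr => jr.2.foldl (fun occ v => occ.insert v (PySem.Set.add (occ.getD v PySem.Set.empty) jr.1)) occ) occ) := by
    intro rs
    induction rs with
    | nil => intro s occ h; rw [PySem.List.enumerate_nil]; exact h
    | cons r t ih =>
      intro s occ h
      rw [PySem.List.enumerate_cons, List.foldl_cons]
      exact ih (s + 1) _ (buildRow_nodup r occ s h)
  exact this rows 0 PySem.Dict.empty (fun v => by rw [PySem.Dict.getD_empty]; exact List.nodup_nil)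

theorem buildOcc_inv (rows : List (List Int)) : OccInv (buildOcc rows) rows := by
  intro v x
  unfold buildOcc
  rw [buildAll_mem rows 0 PySem.Dict.empty v x]
  rw [PySem.Dict.getD_empty]
  constructor
  · rintro (h | ⟨k, hk, hv, hx⟩)
    · exact absurd h (List.not_mem_nil)
    · refine ⟨by omega, by omega, ?_⟩
      have hx' : x = (k : Int) := by omega
      rw [hx']
      unfold rowAt
      rw [PySem.List.pyGetD_eq_getElem _ _ (by omega) (by exact_mod_cast hk)]
      simpa using hv
  · rintro ⟨h0, hl, hv⟩
    refine Or.inr ⟨x.toNat, by omega, ?_, by omega⟩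
    unfold rowAt at hv
    rw [PySem.List.pyGetD_eq_getElem _ _ h0 hl] at hv
    exact hv

theorem outer_gen : ∀ (idxs : List Int) (mat : List (List Int)) (prs : List (Int × Int)) (occ : PySem.Dict Int (PySem.Set Int)),
    OccNodup occ → OccInv occ mat →
    idxs.foldl aOuter (mat, prs) =
      ((idxs.foldl bOuter (mat, prs, occ)).1, (idxs.foldl bOuter (mat, prs, occ)).2.1) := by
  intro idxs
  induction idxs with
  | nil => intro mat prs occ _ _; rfl
  | cons i t ih =>
    intro mat prs occ hnd hinv
    rw [List.foldl_cons, List.foldl_cons]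
    by_cases hlen : (PySem.List.pyGetD mat i []).length = 1
    · set m : Int := PySem.List.pyGetD (PySem.List.pyGetD mat i []) 0 0 with hm
      set js : List Int := PySem.List.sorted (occ.getD m PySem.Set.empty) (fun x => x) false with hjs
      have hperm : js.Perm (occ.getD m PySem.Set.empty) := PySem.List.sorted_perm _ _ _
      have hjnd : js.Nodup := hperm.nodup_iff.2 (hnd m)
      have hjmem : ∀ j : Int, j ∈ js ↔ (0 ≤ j ∧ j < (mat.length : Int) ∧ m ∈ rowAt mat j) := by
        intro j
        rw [hperm.mem_iff, hinv m j]
      have hjbound : ∀ j ∈ js, 0 ≤ j ∧ j < (mat.length : Int) := by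
        intro j hj
        have := (hjmem j).1 hj
        exact ⟨this.1, this.2.1⟩
      obtain ⟨blen, brow, bnd, binv⟩ := foldB_gen m js mat occ hjnd hjbound hnd hinv
      obtain ⟨alen, arow⟩ := foldA_gen m (PySem.List.pyRange 0 (mat.length : Int) 1) mat
        (PySem.List.nodup_pyRange_one _ _) (fun j hj => (PySem.List.mem_pyRange_one.1 hj).1)
      have hmatEq : (PySem.List.pyRange 0 (mat.length : Int) 1).foldl (aInner m) mat = (js.foldl (altStep m) (mat, occ)).1 := by
        apply List.ext_getElem (by rw [alen, blen])
        intro k hk1 hk2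
        have hkm : k < mat.length := by rw [alen] at hk1; exact hk1
        have hA : rowAt ((PySem.List.pyRange 0 (mat.length : Int) 1).foldl (aInner m) mat) (k : Int) =
            ((PySem.List.pyRange 0 (mat.length : Int) 1).foldl (aInner m) mat)[k] := by
          exact PySem.List.pyGetD_eq_getElem _ _ (by omega) (by rw [alen]; exact_mod_cast hkm)
        have hB : rowAt ((js.foldl (altStep m) (mat, occ)).1) (k : Int) =
            ((js.foldl (altStep m) (mat, occ)).1)[k] := by
          exact PySem.List.pyGetD_eq_getElem _ _ (by omega) (by rw [blen]; exact_mod_cast hkm)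
        rw [← hA, ← hB, arow (k : Int) (by omega), brow (k : Int) (by omega)]
        rw [if_pos (PySem.List.mem_pyRange_one.2 ⟨by omega, by exact_mod_cast hkm⟩)]
        by_cases hmk : m ∈ rowAt mat (k : Int)
        · rw [if_pos ((hjmem (k : Int)).2 ⟨by omega, by exact_mod_cast hkm, hmk⟩)]
        · rw [if_neg (fun hcon => hmk ((hjmem (k : Int)).1 hcon).2.2), pruneRow_of_not_mem m _ hmk]
      have hstepA : aOuter (mat, prs) i =
          ((PySem.List.pyRange 0 (mat.length : Int) 1).foldl (aInner m) mat, prs ++ [(i, m)]) := by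
        unfold aOuter
        rw [if_pos hlen]
      have hstepB : bOuter (mat, prs, occ) i =
          ((js.foldl (altStep m) (mat, occ)).1, prs ++ [(i, m)], (js.foldl (altStep m) (mat, occ)).2) := by
        unfold bOuter
        rw [if_pos hlen]
      rw [hstepA, hstepB, hmatEq]
      exact ih _ _ _ bnd binv
    · have hstepA : aOuter (mat, prs) i = (mat, prs) := by
        unfold aOuter
        rw [if_neg hlen]
      have hstepB : bOuter (mat, prs, occ) i = (mat, prs, occ) := by
        unfold bOuter
        rw [if_neg hlen]
      rw [hstepA, hstepB]
      exact ih _ _ _ hnd hinv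

-- ===== VERDICT (by name: the statement is the Claim_ definition above) =====
theorem make_decisions_1_spec : Claim_equal_make_decisions_1 := by
  intro pMatrix pairings _
  show make_decisions_1 pMatrix pairings = make_decisions_1_alt pMatrix pairings
  unfold make_decisions_1 make_decisions_1_alt
  exact outer_gen (PySem.List.pyRange 0 (pMatrix.length : Int) 1) pMatrix pairings (buildOcc pMatrix)
    (buildOcc_nodup pMatrix) (buildOcc_inv pMatrix)
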